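-- pv_equiv track=rewrite | github.com/jujaemin/Problem-Solving | 프로그래머스/lv2/70129. 이진 변환 반복하기/이진 변환 반복하기.py | solution
-- ===== SOURCE A (Python) =====
-- def solution(s):
--     cnt0, cnt = 0, 0
--     while len(s) != 1:
--         c0 = s.count('0')
--         cnt0 += c0
--         x = str(bin(len(s.replace('0', '')))[2: ])
--         s = x
--         cnt += 1
--     return [cnt, cnt0]
-- ===== SOURCE B (Python) =====
-- def solution(s):
--     # Recursive decomposition: peel off the single string step, then recurse on the
--     # integer n (the count of non-'0' chars), combining (steps, zeros) on the way back.
--     z0 = s.count('0')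
--     if len(s) == 1:
--         return [0, 0]
--
--     def rec(n):
--         # steps and removed zeros needed to shrink the binary form of n down to one char
--         if n <= 1:
--             return (0, 0)
--         st, z = rec(n.bit_count())
--         return (st + 1, z + n.bit_length() - n.bit_count())
--
--     st, z = rec(len(s) - z0)
--     return [st + 1, z + z0]
-- ===== Notes on version B (the rewrite author's own statement) =====
-- stated objective: alternative
-- what changed: B peels off the one genuine string step (counting the zero characters of s), then replaces A's while-loop over rebuilt binary strings by a structural recursion rec(n) on the integer count of non-zero characters that combines (steps, zeros) on the way back using bit_length/bit_count, with base case n<=1.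
import Mathlib
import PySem

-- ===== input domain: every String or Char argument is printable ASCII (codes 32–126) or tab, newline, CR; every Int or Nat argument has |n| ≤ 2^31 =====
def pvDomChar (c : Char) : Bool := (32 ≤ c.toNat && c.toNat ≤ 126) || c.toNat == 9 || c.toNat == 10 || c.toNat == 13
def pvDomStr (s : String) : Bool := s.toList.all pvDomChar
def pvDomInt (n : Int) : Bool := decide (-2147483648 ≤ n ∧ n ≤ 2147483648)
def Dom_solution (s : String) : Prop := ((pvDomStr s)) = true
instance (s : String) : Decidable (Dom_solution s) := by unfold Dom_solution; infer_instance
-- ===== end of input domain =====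

-- B peels off the single string step and replaces A's while-loop over rebuilt binary
-- strings by a structural recursion on the non-'0' count combining results on return;
-- return values proved equal on all inputs (A is total).

-- ===== PORT A =====
-- bin(n)[2:] for n ≥ 0 is exactly Nat.toDigits 2 n (bin(0)[2:] = "0" = toDigits 2 0);
-- s.count('0') is the char count, s.replace('0','') removes exactly the '0' chars.
-- The while-loop becomes a fuel recursion (fuel s.length + 3 always suffices).
def solutionLoop : Nat → List Char → Int → Int → List Int
  | 0, _, cnt, cnt0 => [cnt, cnt0]  -- fuel exhausted: never reached (fuel s.length + 3 suffices)
  | fuel + 1, cs, cnt, cnt0 =>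
    if cs.length ≠ 1 then
      let c0 : Nat := cs.count '0'                        -- c0 = s.count('0')
      let x := Nat.toDigits 2 ((cs.filter (· != '0')).length)  -- x = str(bin(len(s.replace('0','')))[2:])
      solutionLoop fuel x (cnt + 1) (cnt0 + (c0 : Int))
    else [cnt, cnt0]

def solution (s : String) : List Int :=
  solutionLoop (s.toList.length + 3) s.toList 0 0

-- ===== PORT B =====
-- termination fact for rec: n.bit_count() < n when 2 ≤ n (cited by decreasing_by)
lemma bitCount_lt_self (n : Nat) (h : 2 ≤ n) : PySem.Int.bitCount (n : Int) < n := by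
  induction n using Nat.strong_induction_on with
  | _ n ih =>
    rw [PySem.Int.bitCount_natCast (m := n) (by omega)]
    by_cases h2 : n / 2 ≤ 1
    · have : n / 2 = 1 := by omega
      rw [this]
      have : PySem.Int.bitCount ((1 : Nat) : Int) = 1 := by decide
      omega
    · have := ih (n / 2) (by omega) (by omega)
      omega

def solRec (n : Nat) : Int × Int :=
  if n ≤ 1 then (0, 0)
  else
    let stz := solRec (PySem.Int.bitCount (n : Int))
    (stz.1 + 1,
     stz.2 + ((PySem.Int.bitLength (n : Int) : Int) - (PySem.Int.bitCount (n : Int) : Int)))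
termination_by n
decreasing_by exact bitCount_lt_self n (by omega)

def solution_alt (s : String) : List Int :=
  let z0 : Nat := s.toList.count '0'
  if s.toList.length = 1 then [0, 0]
  else
    let stz := solRec (s.toList.length - z0)
    [stz.1 + 1, stz.2 + (z0 : Int)]

-- ===== PRECONDITION & SPEC =====
def Spec_solution (s : String) (out : List Int) : Prop := out = solution_alt s
instance (s : String) (out : List Int) : Decidable (Spec_solution s out) := by unfold Spec_solution; infer_instance

-- ===== CLAIM =====
def Claim_equal_solution : Prop := ∀ (s : String), Dom_solution s → Spec_solution s (solution s)

-- ===== LEMMAS AND PROOFS =====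

-- number of '0' chars + number of non-'0' chars = length
lemma count0_add_filter_length (cs : List Char) :
    cs.count '0' + (cs.filter (· != '0')).length = cs.length := by
  induction cs with
  | nil => simp
  | cons c cs ih =>
    by_cases h : c = '0' <;> simp [h] <;> omega

-- length of the binary digits of n (n ≥ 1) is bit_length n
lemma toDigits_two_length (n : Nat) (hn : n ≠ 0) :
    (Nat.toDigits 2 n).length = PySem.Int.bitLength (n : Int) := by
  induction n using Nat.strong_induction_on with
  | _ n ih =>
    rw [Nat.toDigits_eq_if (by norm_num)]
    by_cases h : n < 2
    · have h1 : n = 1 := by omega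
      subst h1; decide
    · have h2 : n / 2 ≠ 0 := by omega
      rw [if_neg h, List.length_append, ih (n / 2) (by omega) h2,
        PySem.Int.bitLength_natCast (m := n) (by omega)]
      simp

-- '0'-count of the binary digits of n + bit_count n = its length
lemma toDigits_two_count0 (n : Nat) :
    (Nat.toDigits 2 n).count '0' + PySem.Int.bitCount (n : Int) = (Nat.toDigits 2 n).length := by
  induction n using Nat.strong_induction_on with
  | _ n ih =>
    by_cases h0 : n = 0
    · subst h0; simp [Nat.toDigits_zero]
    · rw [Nat.toDigits_eq_if (by norm_num)]
      by_cases h : n < 2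
      · have h1 : n = 1 := by omega
        subst h1; decide
      · rw [if_neg h, List.count_append, List.length_append,
          PySem.Int.bitCount_natCast (m := n) (by omega)]
        have ht := ih (n / 2) (by omega)
        rcases Nat.mod_two_eq_zero_or_one n with h' | h' <;> rw [h']
        · have hc : List.count '0' [Nat.digitChar 0] = 1 := rfl
          have hl : [Nat.digitChar 0].length = 1 := rfl
          omega
        · have hc : List.count '0' [Nat.digitChar 1] = 0 := rfl
          have hl : [Nat.digitChar 1].length = 1 := rfl
          omega

-- non-'0' count of the binary digits of n is bit_count n
lemma toDigits_two_filter_length (n : Nat) :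
    ((Nat.toDigits 2 n).filter (· != '0')).length = PySem.Int.bitCount (n : Int) := by
  have h1 := count0_add_filter_length (Nat.toDigits 2 n)
  have h2 := toDigits_two_count0 n
  omega

-- main lemma: on the binary digits of n, A's remaining loop computes exactly solRec n
lemma loop_eq_solRec (n : Nat) : ∀ (fuel : Nat), n ≤ fuel → ∀ (cnt cnt0 : Int),
    solutionLoop fuel (Nat.toDigits 2 n) cnt cnt0
      = [cnt + (solRec n).1, cnt0 + (solRec n).2] := by
  induction n using Nat.strong_induction_on with
  | _ n ih =>
    intro fuel hfuel cnt cnt0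
    by_cases hn : n ≤ 1
    · have hlen : (Nat.toDigits 2 n).length = 1 := by
        interval_cases n <;> decide
      have hrec : solRec n = (0, 0) := by rw [solRec]; simp [hn]
      cases fuel with
      | zero => simp [solutionLoop, hrec]
      | succ f => simp [solutionLoop, hlen, hrec]
    · have hn0 : n ≠ 0 := by omega
      have hlen : (Nat.toDigits 2 n).length ≠ 1 := by
        rw [toDigits_two_length n hn0]
        have hub := PySem.Int.lt_two_pow_bitLength ((n : Int))
        simp only [Int.natAbs_natCast] at hub
        intro h1
        rw [h1] at hub
        omega
      obtain ⟨f, rfl⟩ : ∃ f, fuel = f + 1 := ⟨fuel - 1, by omega⟩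
      rw [solutionLoop, if_pos hlen]
      rw [toDigits_two_filter_length n]
      have hlt : PySem.Int.bitCount (n : Int) < n := bitCount_lt_self n (by omega)
      rw [ih (PySem.Int.bitCount (n : Int)) hlt f (by omega)]
      conv_rhs => rw [solRec]
      rw [if_neg hn]
      have hc : ((Nat.toDigits 2 n).count '0' : Int)
          = (PySem.Int.bitLength (n : Int) : Int) - (PySem.Int.bitCount (n : Int) : Int) := by
        have h2 := toDigits_two_count0 n
        rw [toDigits_two_length n hn0] at h2
        omega
      simp only [hc, List.cons.injEq, and_true]
      exact ⟨by ring, by ring⟩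

-- ===== VERDICT =====
theorem solution_spec : Claim_equal_solution := by
  intro s _
  unfold Spec_solution solution solution_alt
  set cs := s.toList with hcs
  by_cases h1 : cs.length = 1
  · simp [solutionLoop, h1]
  · have hstep : cs.length + 3 = (cs.length + 2) + 1 := by omega
    rw [hstep, solutionLoop, if_pos h1]
    have hsub : (cs.filter (· != '0')).length = cs.length - cs.count '0' := by
      have := count0_add_filter_length cs
      omega
    have hle : (cs.filter (· != '0')).length ≤ cs.length + 2 := by
      have := count0_add_filter_length cs; omega
    rw [loop_eq_solRec _ _ hle]
    simp only [hsub, if_neg h1, List.cons.injEq, and_true]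
    exact ⟨by ring, by ring⟩
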